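-- pv_equiv track=rewrite | github.com/dcep93/etc | alg.py | count
-- ===== SOURCE A (Python) =====
-- def count(n):
--     target = 2 * n
--     rval = 0
--     nums = list(range(1, n+1))
--     for i, n1 in enumerate(nums):
--         if n1 > target: break
--         for j, n2 in enumerate(nums[:i]):
--             a = target - (n1 + n2) # 80
--             if a < 0: break
--             b = abs(n2 - a) # 20
--             c = n2 - b - 1 # 80
--             if c < 0: continue
--             d = int(c / 2)
--             rval += d
--     return rval
-- ===== SOURCE B (Python) =====
-- def _row(m, K):
--     # sum over n2 in [1, K] of c // 2 where c = n2 - abs(2*n2 - m) - 1, counted only when c >= 0;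
--     # c = 3*n2 - m - 1 on n2 <= m//2 (step 3) and c = m - n2 - 1 above (step -1): two arithmetic series.
--     lo1 = max(1, (m + 3) // 3)
--     hi1 = min(K, m // 2)
--     t1 = 0
--     if lo1 <= hi1:
--         L = hi1 - lo1 + 1
--         c0 = 3 * lo1 - m - 1
--         num_odd = L // 2 if c0 % 2 == 0 else (L + 1) // 2
--         t1 = (L * c0 + 3 * L * (L - 1) // 2 - num_odd) // 2
--     lo2 = m // 2 + 1
--     hi2 = min(K, m - 1)
--     t2 = 0
--     if lo2 <= hi2:
--         t2 = (m - lo2 - 1) ** 2 // 4 - (m - hi2 - 2) ** 2 // 4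
--     return t1 + t2
--
--
-- def count(n):
--     # O(n): closed-form inner sum per n1 instead of A's O(n^2) nested loops.
--     total = 0
--     for n1 in range(1, n + 1):
--         total += _row(2 * n - n1, n1 - 1)
--     return total
-- ===== Notes on version B (the rewrite author's own statement) =====
-- stated objective: faster
-- what changed: Replaced A's quadratic nested loops by a single linear loop that, for each outer index n1, evaluates the inner sum of floor terms in closed form: two arithmetic-series formulas, one on each side of the point where the summand's absolute value changes sign.
import Mathlib
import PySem

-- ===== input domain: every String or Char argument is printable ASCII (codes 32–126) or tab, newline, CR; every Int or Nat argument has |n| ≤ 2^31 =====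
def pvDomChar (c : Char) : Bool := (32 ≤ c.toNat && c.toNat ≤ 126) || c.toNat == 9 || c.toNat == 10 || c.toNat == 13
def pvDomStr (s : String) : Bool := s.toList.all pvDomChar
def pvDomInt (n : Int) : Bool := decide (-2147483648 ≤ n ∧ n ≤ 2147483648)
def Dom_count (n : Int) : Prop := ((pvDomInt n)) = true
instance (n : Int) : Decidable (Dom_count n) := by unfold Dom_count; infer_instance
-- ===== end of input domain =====

-- B replaces A's O(n^2) nested loops by an O(n) loop with a closed-form inner sum (objective: faster, asymptotic).


-- ===== PORT A =====
-- inner loop: for j, n2 in enumerate(nums[:i]): with break (a < 0) and continue (c < 0)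
def countInnerA (target n1 : Int) : List Int → Int → Int
  | [], rval => rval
  | n2 :: rest, rval =>
    let a := target - (n1 + n2)
    if a < 0 then rval                                   -- break
    else
      let b := |n2 - a|
      let c := n2 - b - 1
      if c < 0 then countInnerA target n1 rest rval      -- continue
      else countInnerA target n1 rest (rval + PySem.Int.truncdiv c 2)  -- int(c/2); exact on Dom (|c| < 2^53)

-- outer loop: for i, n1 in enumerate(nums): with break (n1 > target)
def countOuterA (target : Int) (nums : List Int) : List (Int × Int) → Int → Int
  | [], rval => rval
  | (i, n1) :: rest, rval =>
    if n1 > target then rval                             -- break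
    else countOuterA target nums rest
      (countInnerA target n1 (PySem.List.slice nums (some 0) (some i)) rval)

def count (n : Int) : Int :=
  let target := 2 * n
  let nums := PySem.List.pyRange 1 (n + 1) 1
  countOuterA target nums (PySem.List.enumerate nums 0) 0

-- ===== PORT B =====
-- _row(m, K): closed-form sum over n2 in [1, K] of c // 2 (c = n2 - |2*n2 - m| - 1, only when c >= 0)
def pvRow (m K : Int) : Int :=
  let lo1 := max 1 (PySem.Int.floordiv (m + 3) 3)
  let hi1 := min K (PySem.Int.floordiv m 2)
  let t1 :=
    if lo1 ≤ hi1 then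
      let L := hi1 - lo1 + 1
      let c0 := 3 * lo1 - m - 1
      let numOdd := if PySem.Int.mod c0 2 = 0 then PySem.Int.floordiv L 2
                    else PySem.Int.floordiv (L + 1) 2
      PySem.Int.floordiv (L * c0 + PySem.Int.floordiv (3 * L * (L - 1)) 2 - numOdd) 2
    else 0
  let lo2 := PySem.Int.floordiv m 2 + 1
  let hi2 := min K (m - 1)
  let t2 :=
    if lo2 ≤ hi2 then
      PySem.Int.floordiv ((m - lo2 - 1) ^ 2) 4 - PySem.Int.floordiv ((m - hi2 - 2) ^ 2) 4
    else 0
  t1 + t2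

def count_alt (n : Int) : Int :=
  (PySem.List.pyRange 1 (n + 1) 1).foldl (fun total n1 => total + pvRow (2 * n - n1) (n1 - 1)) 0

-- ===== PRECONDITION & SPEC =====
def Spec_count (n : Int) (out : Int) : Prop := out = count_alt n
instance (n : Int) (out : Int) : Decidable (Spec_count n out) := by unfold Spec_count; infer_instance

-- ===== CLAIM (what is proved, stated in full; the proofs are below) =====
def Claim_equal_count : Prop := ∀ (n : Int), Dom_count n → Spec_count n (count n)

-- ===== LEMMAS AND PROOFS =====

-- the inner-loop summand, as a function of m = target - n1 and k = n2
def fTerm (m k : Int) : Int :=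
  if k - |2 * k - m| - 1 < 0 then 0 else (k - |2 * k - m| - 1) / 2

-- floordiv/mod by positive literals are Lean's ediv/emod
theorem fd2 (a : Int) : PySem.Int.floordiv a 2 = a / 2 :=
  PySem.Int.floordiv_eq_ediv_of_pos (by norm_num)
theorem fd3 (a : Int) : PySem.Int.floordiv a 3 = a / 3 :=
  PySem.Int.floordiv_eq_ediv_of_pos (by norm_num)
theorem fd4 (a : Int) : PySem.Int.floordiv a 4 = a / 4 :=
  PySem.Int.floordiv_eq_ediv_of_pos (by norm_num)
theorem md2 (a : Int) : PySem.Int.mod a 2 = a % 2 :=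
  PySem.Int.mod_eq_emod_of_pos (by norm_num)

-- piece-1 closed form: numerator and the formula itself
def Nval (c0 L : Int) : Int :=
  L * c0 + (3 * L * (L - 1)) / 2 - (if c0 % 2 = 0 then L / 2 else (L + 1) / 2)

def Fm (c0 L : Int) : Int := Nval c0 L / 2

def Ssq (x : Int) : Int := x ^ 2 / 4

-- pvRow written with the proof-side combinators
theorem pvRow_char (m K : Int) :
    pvRow m K =
      (if max 1 ((m + 3) / 3) ≤ min K (m / 2) then
        Fm (3 * max 1 ((m + 3) / 3) - m - 1) (min K (m / 2) - max 1 ((m + 3) / 3) + 1)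
      else 0) +
      (if m / 2 + 1 ≤ min K (m - 1) then
        Ssq (m - (m / 2 + 1) - 1) - Ssq (m - min K (m - 1) - 2)
      else 0) := by
  simp only [pvRow, Fm, Nval, Ssq, fd2, fd3, fd4, md2]

theorem even3LL (L : Int) : (3 * L * (L - 1)) % 2 = 0 := by
  rcases Int.even_mul_succ_self (L - 1) with ⟨t, ht⟩
  have h : 3 * L * (L - 1) = 3 * (t + t) := by
    calc 3 * L * (L - 1) = 3 * ((L - 1) * (L - 1 + 1)) := by ring
    _ = 3 * (t + t) := by rw [ht]
  omega

theorem Fm_zero (c0 : Int) : Fm c0 0 = 0 := by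
  simp only [Fm, Nval]; split <;> norm_num

theorem Nval_step (c0 L : Int) :
    Nval c0 (L + 1) = Nval c0 L + (c0 + 3 * L) - (c0 + 3 * L) % 2 := by
  simp only [Nval]
  have h1 : (L + 1) * c0 = L * c0 + c0 := by ring
  have h2 : 3 * (L + 1) * (L + 1 - 1) = 3 * L * (L - 1) + 6 * L := by ring
  have h3 := even3LL L
  rw [h1, h2]
  generalize L * c0 = P at *
  generalize 3 * L * (L - 1) = Q at *
  obtain ⟨q, rfl⟩ : ∃ q, Q = 2 * q := ⟨Q / 2, by omega⟩
  rw [show (2 * q + 6 * L) / 2 = q + 3 * L by omega, show (2 * q) / 2 = q by omega]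
  by_cases hpar : c0 % 2 = 0
  · simp only [if_pos hpar]
    obtain ⟨a, rfl⟩ : ∃ a, c0 = 2 * a := ⟨c0 / 2, by omega⟩
    rcases Int.even_or_odd L with ⟨l, rfl⟩ | ⟨l, rfl⟩
    · rw [show (l + l + 1) / 2 = l by omega, show (l + l) / 2 = l by omega,
          show (2 * a + 3 * (l + l)) % 2 = 0 by omega]
      ring
    · rw [show (2 * l + 1 + 1) / 2 = l + 1 by omega, show (2 * l + 1) / 2 = l by omega,
          show (2 * a + 3 * (2 * l + 1)) % 2 = 1 by omega]
      ring
  · simp only [if_neg hpar]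
    obtain ⟨a, rfl⟩ : ∃ a, c0 = 2 * a + 1 := ⟨c0 / 2, by omega⟩
    rcases Int.even_or_odd L with ⟨l, rfl⟩ | ⟨l, rfl⟩
    · rw [show (l + l + 1 + 1) / 2 = l + 1 by omega, show (l + l + 1) / 2 = l by omega,
          show (2 * a + 1 + 3 * (l + l)) % 2 = 1 by omega]
      ring
    · rw [show (2 * l + 1 + 1 + 1) / 2 = l + 1 by omega, show (2 * l + 1 + 1) / 2 = l + 1 by omega,
          show (2 * a + 1 + 3 * (2 * l + 1)) % 2 = 0 by omega]
      ring

theorem Nval_even (c0 : Int) : ∀ L : Int, 0 ≤ L → Nval c0 L % 2 = 0 := by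
  intro L hL
  induction L, hL using Int.le_induction with
  | base => simp only [Nval]; split <;> norm_num
  | succ L hL ih =>
    rw [Nval_step]
    generalize Nval c0 L = A at *
    generalize c0 + 3 * L = B at *
    omega

theorem Fm_step (c0 L : Int) (hL : 0 ≤ L) : Fm c0 (L + 1) = Fm c0 L + (c0 + 3 * L) / 2 := by
  have hN := Nval_even c0 L hL
  simp only [Fm]
  rw [Nval_step]
  generalize Nval c0 L = A at *
  generalize c0 + 3 * L = B at *
  omega

theorem Ssq_step (y : Int) (_hy : 0 ≤ y) : Ssq y - Ssq (y - 1) = y / 2 := by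
  simp only [Ssq]
  rcases Int.even_or_odd y with ⟨t, ht⟩ | ⟨t, ht⟩
  · have h1 : y ^ 2 = 4 * (t * t) := by rw [ht]; ring
    have h2 : (y - 1) ^ 2 = 4 * (t * t) - 4 * t + 1 := by rw [ht]; ring
    rw [h1, h2]; generalize t * t = u; omega
  · have h1 : y ^ 2 = 4 * (t * t) + 4 * t + 1 := by rw [ht]; ring
    have h2 : (y - 1) ^ 2 = 4 * (t * t) := by rw [ht]; ring
    rw [h1, h2]; generalize t * t = u; omega

theorem row_zero (m : Int) : pvRow m 0 = 0 := by
  rw [pvRow_char]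
  rw [if_neg (by omega), if_neg (by omega)]
  norm_num

theorem row_step (m K : Int) (hK : 0 ≤ K) : pvRow m (K + 1) = pvRow m K + fTerm m (K + 1) := by
  rw [pvRow_char, pvRow_char]
  by_cases hA : K + 1 ≤ m / 2
  · -- new term (if any) falls in piece 1; piece 2 empty on both sides
    have habs : |2 * (K + 1) - m| = m - 2 * (K + 1) := by
      rw [abs_of_nonpos (by omega)]; ring
    rw [if_neg (show ¬ (m / 2 + 1 ≤ min (K + 1) (m - 1)) by omega),
        if_neg (show ¬ (m / 2 + 1 ≤ min K (m - 1)) by omega)]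
    by_cases hlo : max 1 ((m + 3) / 3) ≤ K + 1
    · -- piece 1 grows by one term
      have hm2 : 2 ≤ m := by omega
      have hq3 : max 1 ((m + 3) / 3) = (m + 3) / 3 := by omega
      rw [hq3, show min (K + 1) (m / 2) = K + 1 by omega,
          show min K (m / 2) = K by omega]
      have hf : fTerm m (K + 1) = (3 * (K + 1) - m - 1) / 2 := by
        simp only [fTerm, habs]
        rw [if_neg (by omega), show K + 1 - (m - 2 * (K + 1)) - 1 = 3 * (K + 1) - m - 1 by ring]
      rw [hf, if_pos (by omega)]
      by_cases hK1 : (m + 3) / 3 ≤ K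
      · rw [if_pos (by omega)]
        rw [show K + 1 - (m + 3) / 3 + 1 = (K - (m + 3) / 3 + 1) + 1 by ring]
        rw [Fm_step _ _ (by omega)]
        generalize Fm (3 * ((m + 3) / 3) - m - 1) (K - (m + 3) / 3 + 1) = X
        omega
      · rw [if_neg (by omega)]
        rw [show K + 1 - (m + 3) / 3 + 1 = (0 : Int) + 1 by omega]
        rw [Fm_step _ 0 le_rfl, Fm_zero]
        omega
    · -- new term is below the piece-1 window: c < 0, nothing changes
      have hf : fTerm m (K + 1) = 0 := by
        simp only [fTerm, habs]
        rw [if_pos (by omega)]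
      rw [hf, if_neg (by omega), if_neg (by omega)]
      norm_num
  · -- new term (if any) falls in piece 2; piece 1 unchanged
    have habs : |2 * (K + 1) - m| = 2 * (K + 1) - m := abs_of_nonneg (by omega)
    rw [show min (K + 1) (m / 2) = min K (m / 2) by omega]
    by_cases hB : K + 1 ≤ m - 1
    · have hf : fTerm m (K + 1) = (m - K - 2) / 2 := by
        simp only [fTerm, habs]
        rw [if_neg (by omega), show K + 1 - (2 * (K + 1) - m) - 1 = m - K - 2 by ring]
      rw [hf, show min (K + 1) (m - 1) = K + 1 by omega,
          if_pos (show m / 2 + 1 ≤ K + 1 by omega)]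
      by_cases hg : m / 2 + 1 ≤ K
      · rw [show min K (m - 1) = K by omega, if_pos (show m / 2 + 1 ≤ K by omega)]
        have hstep := Ssq_step (m - K - 2) (by omega)
        rw [show m - (K + 1) - 2 = m - K - 2 - 1 by ring]
        generalize hX : Fm (3 * max 1 ((m + 3) / 3) - m - 1) (min K (m / 2) - max 1 ((m + 3) / 3) + 1) = X at *
        generalize Ssq (m - (m / 2 + 1) - 1) = S1 at *
        generalize Ssq (m - K - 2 - 1) = S2 at *
        generalize Ssq (m - K - 2) = S3 at *
        omega
      · rw [if_neg (show ¬ (m / 2 + 1 ≤ min K (m - 1)) by omega)]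
        have hKq : K = m / 2 := by omega
        have hstep := Ssq_step (m - (m / 2 + 1) - 1) (by omega)
        rw [show m - (K + 1) - 2 = m - (m / 2 + 1) - 1 - 1 by omega]
        generalize hX : Fm (3 * max 1 ((m + 3) / 3) - m - 1) (min K (m / 2) - max 1 ((m + 3) / 3) + 1) = X at *
        generalize Ssq (m - (m / 2 + 1) - 1) = S1 at *
        generalize Ssq (m - (m / 2 + 1) - 1 - 1) = S2 at *
        omega
    · -- past the piece-2 window: c < 0, nothing changes
      have hf : fTerm m (K + 1) = 0 := by
        simp only [fTerm, habs]
        rw [if_pos (by omega)]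
      rw [hf, show min (K + 1) (m - 1) = min K (m - 1) by omega]
      norm_num

theorem row_eq (m : Int) :
    ∀ K : Int, 0 ≤ K →
      pvRow m K = ((PySem.List.pyRange 1 (K + 1) 1).map (fTerm m)).sum := by
  intro K hK
  induction K, hK using Int.le_induction with
  | base =>
    rw [PySem.List.pyRange_one_eq_nil (by omega)]
    simpa using row_zero m
  | succ K hK ih =>
    rw [PySem.List.pyRange_one_succ_right (by omega), List.map_append, List.sum_append]
    rw [row_step m K hK, ih]
    simp

theorem innerA_no_break (target n1 : Int) :
    ∀ (l : List Int) (acc : Int), (∀ x ∈ l, 0 ≤ target - (n1 + x)) →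
      countInnerA target n1 l acc = acc + (l.map (fTerm (target - n1))).sum := by
  intro l
  induction l with
  | nil => intro acc _; simp [countInnerA]
  | cons x rest ih =>
    intro acc h
    have ha : ¬ (target - (n1 + x) < 0) := by
      have := h x (by simp); omega
    have harg : x - (target - (n1 + x)) = 2 * x - (target - n1) := by ring
    simp only [countInnerA, if_neg ha, harg]
    by_cases hc : x - |2 * x - (target - n1)| - 1 < 0
    · have hfx : fTerm (target - n1) x = 0 := by
        simp only [fTerm]; rw [if_pos hc]
      rw [if_pos hc, ih acc (fun y hy => h y (List.mem_cons_of_mem x hy))]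
      simp [hfx]
    · have hfx : fTerm (target - n1) x = (x - |2 * x - (target - n1)| - 1) / 2 := by
        simp only [fTerm]; rw [if_neg hc]
      have htd : PySem.Int.truncdiv (x - |2 * x - (target - n1)| - 1) 2
          = (x - |2 * x - (target - n1)| - 1) / 2 := by
        unfold PySem.Int.truncdiv
        rw [Int.tdiv_eq_ediv_of_nonneg (by omega)]
      rw [if_neg hc, ih _ (fun y hy => h y (List.mem_cons_of_mem x hy)), htd]
      simp only [List.map_cons, List.sum_cons, hfx]
      ring

theorem slice_pyRange (n i : Int) (h0 : 0 ≤ i) (hi : i ≤ n) :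
    PySem.List.slice (PySem.List.pyRange 1 (n + 1) 1) (some 0) (some i) =
      PySem.List.pyRange 1 (i + 1) 1 := by
  rw [PySem.List.pyRange_one_append 1 (i + 1) (n + 1) (by omega) (by omega)]
  simp only [PySem.List.slice_zero_start, PySem.List.slice_to _ h0]
  rw [List.take_append_of_le_length (by simp only [PySem.List.length_pyRange_one]; omega)]
  rw [List.take_of_length_le (by simp only [PySem.List.length_pyRange_one]; omega)]

theorem outer_eq (n : Int) (_hn : 0 ≤ n) :
    ∀ (k : Nat) (i : Int), 0 ≤ i → i ≤ n → n - i = (k : Int) → ∀ acc : Int,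
      countOuterA (2 * n) (PySem.List.pyRange 1 (n + 1) 1)
        (PySem.List.enumerate (PySem.List.pyRange (i + 1) (n + 1) 1) i) acc
      = acc + ((PySem.List.pyRange (i + 1) (n + 1) 1).map
          (fun n1 => ((PySem.List.pyRange 1 n1 1).map (fTerm (2 * n - n1))).sum)).sum := by
  intro k
  induction k with
  | zero =>
    intro i h0 hi hk acc
    rw [show PySem.List.pyRange (i + 1) (n + 1) 1 = []
        from PySem.List.pyRange_one_eq_nil (by omega)]
    simp [countOuterA, PySem.List.enumerate]
  | succ k ih =>
    intro i h0 hi hk acc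
    rw [show PySem.List.pyRange (i + 1) (n + 1) 1
          = (i + 1) :: PySem.List.pyRange (i + 1 + 1) (n + 1) 1
        from PySem.List.pyRange_one_cons (by omega)]
    rw [PySem.List.enumerate_cons]
    simp only [countOuterA]
    rw [if_neg (by omega)]
    rw [slice_pyRange n i h0 (by omega)]
    rw [innerA_no_break (2 * n) (i + 1) _ acc
      (fun x hx => by
        rw [PySem.List.mem_pyRange_one] at hx; omega)]
    rw [ih (i + 1) (by omega) (by omega) (by omega)]
    simp only [List.map_cons, List.sum_cons]
    ring

-- ===== VERDICT (by name: the statement is the Claim_ definition above) =====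
theorem count_spec : Claim_equal_count := by
  intro n _
  unfold Spec_count count count_alt
  by_cases hn : n < 1
  · rw [PySem.List.pyRange_one_eq_nil (by omega)]
    simp [countOuterA, PySem.List.enumerate]
  · rw [PySem.List.foldl_add]
    have h := outer_eq n (by omega) (n - 0).toNat 0 le_rfl (by omega) (by omega) 0
    simp only [zero_add] at h ⊢
    rw [h]
    apply congrArg
    apply List.map_congr_left
    intro n1 hmem
    rw [PySem.List.mem_pyRange_one] at hmem
    rw [row_eq (2 * n - n1) (n1 - 1) (by omega)]
    rw [show n1 - 1 + 1 = n1 by ring]
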